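-- pv_equiv track=rewrite | github.com/sebsgit/toolbox | stacktool/stacktool.py | generate_vs_code_commands
-- ===== SOURCE A (Python) =====
-- def generate_vs_code_commands(stacktrace):
--     unique_files = {}
--     for entry in stacktrace:
--         if entry['file'] not in unique_files:
--             unique_files[entry['file']] = entry['line']
--
--     commands = []
--     for entry in unique_files.keys():
--         command = f'code -g {entry}:{unique_files[entry]} -r'
--         commands.append(command)
--     return commands
-- ===== SOURCE B (Python) =====
-- def generate_vs_code_commands(stacktrace):
--     commands = []
--     remaining = list(stacktrace)
--     while remaining:
--         head = remaining[0]
--         f = head['file']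
--         commands.append(f'code -g {f}:{head["line"]} -r')
--         remaining = [e for e in remaining[1:] if e['file'] != f]
--     return commands
-- ===== Notes on version B (the rewrite author's own statement) =====
-- stated objective: alternative
-- what changed: A builds a file->line dict in one pass and formats commands in a second pass over its keys; B keeps no dict or set at all: it repeatedly takes the first entry of a shrinking worklist, emits its command, and filters every later entry with the same file out of the worklist (peel-and-filter).
import Mathlib
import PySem

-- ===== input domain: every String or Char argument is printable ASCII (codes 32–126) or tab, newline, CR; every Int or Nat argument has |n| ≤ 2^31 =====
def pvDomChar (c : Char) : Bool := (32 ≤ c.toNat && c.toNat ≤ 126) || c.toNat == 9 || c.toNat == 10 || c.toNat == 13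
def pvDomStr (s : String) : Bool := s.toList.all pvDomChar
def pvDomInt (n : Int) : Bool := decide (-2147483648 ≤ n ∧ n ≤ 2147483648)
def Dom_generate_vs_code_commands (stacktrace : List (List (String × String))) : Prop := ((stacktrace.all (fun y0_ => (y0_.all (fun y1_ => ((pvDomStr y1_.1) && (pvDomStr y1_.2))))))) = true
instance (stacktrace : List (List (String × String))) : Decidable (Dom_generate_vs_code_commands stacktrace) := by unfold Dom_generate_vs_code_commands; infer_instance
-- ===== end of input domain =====

-- B drops A's file->line dict and second formatting pass entirely: it repeatedly peels the first
-- entry of a shrinking worklist, emits its command, and filters out later entries with the same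
-- file (objective: alternative decomposition, same return value).

-- ===== PORT A =====
-- A's first loop: build the dict of unique files (first occurrence's line).
def pvStepA (d : PySem.Dict String String) (entry : List (String × String)) : PySem.Dict String String :=
  if (PySem.Dict.contains d (PySem.Dict.getD (PySem.Dict.mk entry) "file" "")) then d
  else PySem.Dict.insert d (PySem.Dict.getD (PySem.Dict.mk entry) "file" "")
        (PySem.Dict.getD (PySem.Dict.mk entry) "line" "")

def generate_vs_code_commands (stacktrace : List (List (String × String))) : List String :=
  let unique_files := stacktrace.foldl pvStepA PySem.Dict.empty
  -- A's second loop: for entry in unique_files.keys(): commands.append(f'code -g {entry}:{unique_files[entry]} -r')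
  (PySem.Dict.keys unique_files).foldl
    (fun commands k => commands ++ ["code -g " ++ k ++ ":" ++ PySem.Dict.getD unique_files k "" ++ " -r"]) []

-- ===== PORT B =====
-- entry['file'] as B reads it (total under Pre_, which rules out the KeyError inputs).
def pvFile (entry : List (String × String)) : String :=
  PySem.Dict.getD (PySem.Dict.mk entry) "file" ""

-- B's while loop: peel the head, append its command, filter its file out of the worklist.
def pvLoopB (commands : List String) (remaining : List (List (String × String))) : List String :=
  match remaining with
  | [] => commands
  | head :: rest =>
      pvLoopB
        (commands ++ ["code -g " ++ pvFile head ++ ":" ++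
                      PySem.Dict.getD (PySem.Dict.mk head) "line" "" ++ " -r"])
        (rest.filter (fun e => pvFile e != pvFile head))
termination_by remaining.length
decreasing_by
  simp only [List.length_cons, List.length_unattach]
  exact Nat.lt_succ_of_le ((List.length_filter_le _ _).trans (by simp))

def generate_vs_code_commands_alt (stacktrace : List (List (String × String))) : List String :=
  pvLoopB [] stacktrace

-- ===== PRECONDITION & SPEC =====
-- Pre_ excludes exactly the inputs where Python A raises KeyError: an entry without a 'file'
-- key, or a first-occurrence entry (no earlier entry with the same 'file' value) without 'line'.
def Pre_generate_vs_code_commands (stacktrace : List (List (String × String))) : Prop :=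
  ∀ i : Fin stacktrace.length,
    (PySem.Dict.get? (PySem.Dict.mk (stacktrace.get i)) "file").isSome = true ∧
    ((∀ j : Fin stacktrace.length, (j : ℕ) < (i : ℕ) →
        PySem.Dict.get? (PySem.Dict.mk (stacktrace.get j)) "file" ≠
        PySem.Dict.get? (PySem.Dict.mk (stacktrace.get i)) "file") →
      (PySem.Dict.get? (PySem.Dict.mk (stacktrace.get i)) "line").isSome = true)

instance (stacktrace : List (List (String × String))) : Decidable (Pre_generate_vs_code_commands stacktrace) := by
  unfold Pre_generate_vs_code_commands; infer_instance

def pvWitness_generate_vs_code_commands : (List (List (String × String))) :=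
  [[("file", "a.py"), ("line", "3")], [("file", "b.py"), ("line", "7")], [("file", "a.py")]]

def Spec_generate_vs_code_commands (stacktrace : List (List (String × String))) (out : List String) : Prop := out = generate_vs_code_commands_alt stacktrace
instance (stacktrace : List (List (String × String))) (out : List String) : Decidable (Spec_generate_vs_code_commands stacktrace out) := by unfold Spec_generate_vs_code_commands; infer_instance

-- ===== CLAIM (what is proved, stated in full; the proofs are below) =====
def Claim_equal_generate_vs_code_commands : Prop := ∀ (stacktrace : List (List (String × String))), Dom_generate_vs_code_commands stacktrace → Pre_generate_vs_code_commands stacktrace → Spec_generate_vs_code_commands stacktrace (generate_vs_code_commands stacktrace)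

-- ===== LEMMAS AND PROOFS =====

def pvFmt (p : String × String) : String := "code -g " ++ p.1 ++ ":" ++ p.2 ++ " -r"

-- A's loop body, written with the pvFile abbreviation (definitional).
theorem pvStepA_eq (d : PySem.Dict String String) (e : List (String × String)) :
    pvStepA d e = if PySem.Dict.contains d (pvFile e) then d
      else PySem.Dict.insert d (pvFile e) (PySem.Dict.getD (PySem.Dict.mk e) "line" "") := rfl

theorem pvStepA_of_contains (d : PySem.Dict String String) (e : List (String × String))
    (h : PySem.Dict.contains d (pvFile e) = true) : pvStepA d e = d := by
  rw [pvStepA_eq, if_pos h]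

theorem pvStepA_of_not_contains (d : PySem.Dict String String) (e : List (String × String))
    (h : PySem.Dict.contains d (pvFile e) = false) :
    pvStepA d e = PySem.Dict.insert d (pvFile e) (PySem.Dict.getD (PySem.Dict.mk e) "line" "") := by
  rw [pvStepA_eq, if_neg (by simp [h])]

-- A's dict keeps its keys unique through the whole first loop.
theorem pv_nodup_fold (s : List (List (String × String))) (d : PySem.Dict String String)
    (h : (PySem.Dict.keys d).Nodup) : (PySem.Dict.keys (s.foldl pvStepA d)).Nodup := by
  induction s generalizing d with
  | nil => exact h
  | cons e es ih =>
    simp only [List.foldl]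
    by_cases hc : PySem.Dict.contains d (pvFile e) = true
    · rw [pvStepA_of_contains d e hc]; exact ih d h
    · have hcf : PySem.Dict.contains d (pvFile e) = false := by simpa using hc
      rw [pvStepA_of_not_contains d e hcf]
      apply ih
      rw [PySem.Dict.keys_insert_of_not_contains d _ hcf]
      refine List.Nodup.append h (List.nodup_singleton _) ?_
      intro a ha hb
      simp at hb; subst hb
      exact absurd ((PySem.Dict.contains_iff_mem_keys d _).mpr ha) (by simp [hcf])

-- A's result, written through items of the dict the first loop builds.
theorem pv_A_items (st : List (List (String × String))) :
    generate_vs_code_commands st =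
      (PySem.Dict.items (st.foldl pvStepA PySem.Dict.empty)).map pvFmt := by
  unfold generate_vs_code_commands
  have hnd : (PySem.Dict.keys (st.foldl pvStepA PySem.Dict.empty)).Nodup :=
    pv_nodup_fold st PySem.Dict.empty (by simp)
  set d := st.foldl pvStepA PySem.Dict.empty
  rw [PySem.List.foldl_append_singleton_eq_map]
  rw [PySem.Dict.items_eq_map_keys d hnd ""]
  simp [pvFmt]

-- Entries whose file is already in the dict do not change A's first loop.
theorem pv_skip (s : List (List (String × String))) (d : PySem.Dict String String) (f : String)
    (h : PySem.Dict.contains d f = true) :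
    s.foldl pvStepA d = (s.filter (fun e => pvFile e != f)).foldl pvStepA d := by
  induction s generalizing d with
  | nil => rfl
  | cons e es ih =>
    by_cases hef : pvFile e = f
    · have hskip : pvStepA d e = d := pvStepA_of_contains d e (by rw [hef]; exact h)
      simp only [List.foldl, List.filter, hef, bne_self_eq_false]
      rw [hskip]
      exact ih d h
    · have hkeep : (pvFile e != f) = true := by simp only [bne_iff_ne, ne_eq]; exact hef
      simp only [List.foldl, List.filter, hkeep]
      apply ih
      -- contains is monotone through pvStepA
      rw [pvStepA_eq]
      split
      · exact h
      · rw [PySem.Dict.contains_insert]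
        simp [h]

-- Folding from a dict whose items are (f,l) :: items d, over entries never mentioning f,
-- keeps (f,l) in front of what the fold from d produces.
theorem pv_prefix (s : List (List (String × String))) (d d' : PySem.Dict String String)
    (f l : String) (hs : ∀ e ∈ s, pvFile e ≠ f)
    (hitems : PySem.Dict.items d' = (f, l) :: PySem.Dict.items d) :
    PySem.Dict.items (s.foldl pvStepA d') = (f, l) :: PySem.Dict.items (s.foldl pvStepA d) := by
  induction s generalizing d d' with
  | nil => simpa using hitems
  | cons e es ih =>
    have hef : pvFile e ≠ f := hs e (List.mem_cons_self)
    have h1 : (pvFile e ∈ PySem.Dict.keys d') ↔ (pvFile e ∈ PySem.Dict.keys d) := by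
      simp only [PySem.Dict.keys, hitems, List.map_cons, List.mem_cons]
      exact ⟨fun h => h.resolve_left hef, Or.inr⟩
    have hcontains : PySem.Dict.contains d' (pvFile e) = PySem.Dict.contains d (pvFile e) := by
      rw [PySem.Dict.contains_eq_decide_mem_keys, PySem.Dict.contains_eq_decide_mem_keys]
      exact decide_eq_decide.mpr h1
    simp only [List.foldl]
    by_cases hc : PySem.Dict.contains d (pvFile e) = true
    · rw [pvStepA_of_contains d e hc, pvStepA_of_contains d' e (by rw [hcontains]; exact hc)]
      exact ih _ _ (fun x hx => hs x (List.mem_cons_of_mem e hx)) hitems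
    · have hcf : PySem.Dict.contains d (pvFile e) = false := by simpa using hc
      have hcf' : PySem.Dict.contains d' (pvFile e) = false := by rw [hcontains]; exact hcf
      rw [pvStepA_of_not_contains d e hcf, pvStepA_of_not_contains d' e hcf']
      apply ih _ _ (fun x hx => hs x (List.mem_cons_of_mem e hx))
      rw [PySem.Dict.items_insert_of_not_contains d' _ hcf',
          PySem.Dict.items_insert_of_not_contains d _ hcf, hitems]
      rfl

-- Main invariant: A's items (formatted), appended to the accumulator, is exactly B's loop.
theorem pv_main (n : ℕ) : ∀ (st : List (List (String × String))), st.length ≤ n →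
    ∀ acc : List String,
    acc ++ (PySem.Dict.items (st.foldl pvStepA PySem.Dict.empty)).map pvFmt = pvLoopB acc st := by
  induction n with
  | zero =>
    intro st hst acc
    have hnil : st = [] := List.eq_nil_of_length_eq_zero (Nat.le_zero.mp hst)
    subst hnil
    rw [pvLoopB.eq_def]
    simp [PySem.Dict.empty]
  | succ n ih =>
    intro st hst acc
    match st with
    | [] => rw [pvLoopB.eq_def]; simp [PySem.Dict.empty]
    | e :: rest =>
      set f := pvFile e with hf
      set l := PySem.Dict.getD (PySem.Dict.mk e) "line" "" with hl
      set rest' := rest.filter (fun x => pvFile x != f) with hrest'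
      have hcE : PySem.Dict.contains (PySem.Dict.empty : PySem.Dict String String) f = false := by
        simp
      have hstep : pvStepA PySem.Dict.empty e = PySem.Dict.insert PySem.Dict.empty f l :=
        pvStepA_of_not_contains _ e hcE
      have hd1 : PySem.Dict.contains (PySem.Dict.insert PySem.Dict.empty f l) f = true :=
        PySem.Dict.contains_insert_self _ _ _
      have hfold : (e :: rest).foldl pvStepA PySem.Dict.empty =
          rest'.foldl pvStepA (PySem.Dict.insert PySem.Dict.empty f l) := by
        simp only [List.foldl, hstep]
        exact pv_skip rest _ f hd1
      have hitems1 : PySem.Dict.items (PySem.Dict.insert (PySem.Dict.empty : PySem.Dict String String) f l)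
          = (f, l) :: PySem.Dict.items (PySem.Dict.empty : PySem.Dict String String) :=
        PySem.Dict.items_insert_of_not_contains _ l hcE
      have hempty : PySem.Dict.items (PySem.Dict.empty : PySem.Dict String String) = [] := by
        simp [PySem.Dict.empty]
      have hpre : PySem.Dict.items (rest'.foldl pvStepA (PySem.Dict.insert PySem.Dict.empty f l)) =
          (f, l) :: PySem.Dict.items (rest'.foldl pvStepA PySem.Dict.empty) := by
        apply pv_prefix rest' PySem.Dict.empty _ f l
        · intro x hx
          have := List.of_mem_filter hx
          simpa using this
        · rw [hitems1, hempty]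
      have hlen : rest'.length ≤ n := by
        have h1 : rest'.length ≤ rest.length := List.length_filter_le _ _
        have h2 : rest.length ≤ n := by simpa using Nat.le_of_succ_le_succ hst
        omega
      rw [hfold, hpre]
      rw [pvLoopB.eq_def]
      simp only []
      rw [← ih rest' hlen (acc ++ ["code -g " ++ pvFile e ++ ":" ++
            PySem.Dict.getD (PySem.Dict.mk e) "line" "" ++ " -r"])]
      simp [pvFmt, ← hf, ← hl]

-- ===== VERDICT (by name: the statement is the Claim_ definition above) =====
theorem generate_vs_code_commands_spec : Claim_equal_generate_vs_code_commands := by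
  intro st _ _
  unfold Spec_generate_vs_code_commands generate_vs_code_commands_alt
  rw [pv_A_items st, ← pv_main st.length st (le_refl _) []]
  rfl
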